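-- pv_equiv track=rewrite | github.com/guixiaole/traincv | MarkPicture/LUMPOperate/PhotoReplace.py | findlr
-- ===== SOURCE A (Python) =====
-- def findlr(image, boundary):
--     """
--     在图像替换的时候，寻找到他的边界。
--     :param image:
--     :param boundary:
--     :return:
--     @gxl 9/20
--     """
--     lr = []
--     for j in range(len(image)):
--         left = len(image[0])
--         right = 0
--         for i in range(1, len(image[0])):
--             temp = image[j][i - 1][0]
--             temp1 = image[j][i][0]
--             if image[j][i - 1][0] >= boundary > image[j][i][0]:
--                 left = i
--                 break
--         for i in range(len(image[0]) - 2, 0, -1):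
--             temp2 = image[j][i + 1][0]
--             temp3 = image[j][i][0]
--             if image[j][i + 1][0] >= boundary > image[j][i][0]:
--                 right = i
--                 break
--         lr.append([left, right])
--     return lr
-- ===== SOURCE B (Python) =====
-- def findlr(image, boundary):
--     """Single fused forward pass per row maintaining both boundaries."""
--     if not image:
--         return []
--     cols = len(image[0])
--     lr = []
--     for row in image:
--         left = cols
--         right = 0
--         for i in range(1, cols):
--             if row[i - 1][0] >= boundary > row[i][0] and left == cols:
--                 left = i
--             if i <= cols - 2 and row[i + 1][0] >= boundary > row[i][0]:
--                 right = i
--         lr.append([left, right])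
--     return lr
-- ===== Notes on version B (the rewrite author's own statement) =====
-- stated objective: alternative
-- what changed: Replaces A's two directional early-breaking scans per row with one fused forward pass that maintains both the first left-boundary and the last right-boundary column.
-- outside the precondition, e.g. on findlr([[[5], [0], [], [0], [5]]], 3): A returns [[1, 3]], B raises IndexError
import Mathlib
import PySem

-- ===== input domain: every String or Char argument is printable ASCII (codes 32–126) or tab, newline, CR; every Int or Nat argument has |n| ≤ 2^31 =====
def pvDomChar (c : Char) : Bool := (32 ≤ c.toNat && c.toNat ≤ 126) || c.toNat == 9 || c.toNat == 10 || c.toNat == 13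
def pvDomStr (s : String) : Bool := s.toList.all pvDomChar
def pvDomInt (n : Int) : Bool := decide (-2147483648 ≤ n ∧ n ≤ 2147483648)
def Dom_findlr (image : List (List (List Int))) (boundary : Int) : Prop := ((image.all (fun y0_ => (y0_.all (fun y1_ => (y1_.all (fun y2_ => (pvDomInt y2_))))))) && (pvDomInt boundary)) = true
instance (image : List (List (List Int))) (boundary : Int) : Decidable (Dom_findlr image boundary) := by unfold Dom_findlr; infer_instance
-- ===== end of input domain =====

-- B fuses A's two directional early-breaking scans per row into one forward pass
-- maintaining both running boundaries (alternative decomposition, same cost).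


-- ===== PORT A =====
-- shared indexing helper: `pvPix row i` = Python `row[i][0]`; exact whenever
-- i < row.length and row[i] is nonempty (guaranteed by Pre_findlr for the
-- indices the loops touch), defaulting to 0 otherwise.
def pvPix (row : List (List Int)) (i : Nat) : Int := (row.getD i []).getD 0 0

-- A: per row, a forward scan breaking at the first left boundary, then a
-- backward scan breaking at the first (i.e. largest) right boundary.
def findlr (image : List (List (List Int))) (boundary : Int) : List (List Int) :=
  (List.range image.length).foldl
    (fun lr j =>
      let row := image.getD j []
      let cols := (image.getD 0 []).length
      -- for i in range(1, cols): … break  ≡ first match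
      let left : Int :=
        match (List.range' 1 (cols - 1)).find?
            (fun i => decide (pvPix row (i - 1) ≥ boundary ∧ boundary > pvPix row i)) with
        | some i => (i : Int)
        | none => (cols : Int)
      -- for i in range(cols-2, 0, -1): … break  ≡ first match of the reversed range
      let right : Int :=
        match ((List.range' 1 (cols - 2)).reverse).find?
            (fun i => decide (pvPix row (i + 1) ≥ boundary ∧ boundary > pvPix row i)) with
        | some i => (i : Int)
        | none => 0
      lr ++ [[left, right]])
    []

-- ===== PORT B =====
-- B: one fused forward pass per row, keeping the first left boundary
-- (guarded by `left == cols`) and overwriting the right boundary so it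
-- ends at the largest valid i ≤ cols-2.
def findlr_alt (image : List (List (List Int))) (boundary : Int) : List (List Int) :=
  image.map (fun row =>
    let cols := (image.headD []).length
    let s := (List.range' 1 (cols - 1)).foldl
      (fun (s : Int × Int) i =>
        (if pvPix row (i - 1) ≥ boundary ∧ boundary > pvPix row i ∧ s.1 = (cols : Int)
           then (i : Int) else s.1,
         if i ≤ cols - 2 ∧ pvPix row (i + 1) ≥ boundary ∧ boundary > pvPix row i
           then (i : Int) else s.2))
      ((cols : Int), 0)
    [s.1, s.2])

-- ===== PRECONDITION & SPEC =====
-- Pre_ excludes exactly the inputs where Python A raises IndexError (a row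
-- shorter than len(image[0]), or an empty pixel, while ≥ 2 columns make the
-- scans run); it slightly narrows A's domain: an early `break` can let A skip
-- a bad pixel/short tail and still return, but B's full pass raises there.
def Pre_findlr (image : List (List (List Int))) (boundary : Int) : Prop :=
  (image.headD []).length ≤ 1 ∨
    ∀ row ∈ image, (image.headD []).length ≤ row.length ∧
      ∀ px ∈ row.take (image.headD []).length, px ≠ []
instance (image : List (List (List Int))) (boundary : Int) : Decidable (Pre_findlr image boundary) := by
  unfold Pre_findlr; infer_instance
def pvWitness_findlr : List (List (List Int)) × Int := ([[[5], [0], [2]], [[1], [4], [0]]], 3)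

def Spec_findlr (image : List (List (List Int))) (boundary : Int) (out : List (List Int)) : Prop := out = findlr_alt image boundary
instance (image : List (List (List Int))) (boundary : Int) (out : List (List Int)) : Decidable (Spec_findlr image boundary out) := by unfold Spec_findlr; infer_instance

-- ===== CLAIM (what is proved, stated in full; the proofs are below) =====
def Claim_equal_findlr : Prop := ∀ (image : List (List (List Int))) (boundary : Int), Dom_findlr image boundary → Pre_findlr image boundary → Spec_findlr image boundary (findlr image boundary)

-- ===== LEMMAS AND PROOFS =====

-- appending singletons in a fold is mapping
theorem pv_foldl_append_map {α β : Type} (l : List α) (f : α → β) (acc : List β) :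
    l.foldl (fun a x => a ++ [f x]) acc = acc ++ l.map f := by
  induction l generalizing acc with
  | nil => simp
  | cons x xs ih => simp [List.foldl, ih]

-- mapping over indices equals mapping over the list
theorem pv_map_range_getD {α β : Type} (xs : List α) (d : α) (f : α → β) :
    (List.range xs.length).map (fun j => f (xs.getD j d)) = xs.map f := by
  induction xs with
  | nil => simp
  | cons x t ih =>
    simp only [List.length_cons, List.range_succ_eq_map, List.map_cons, List.map_map]
    simp only [List.getD_cons_zero]
    refine congrArg (f x :: ·) ?_
    simpa using ih

-- once the state has left the sentinel it never changes again
theorem pv_fold_stay (L : List Nat) (p : Nat → Bool) (s v : Int)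
    (hv : v ≠ s) :
    L.foldl (fun l i => if p i ∧ l = s then (i : Int) else l) v = v := by
  induction L with
  | nil => rfl
  | cons x xs ih => simp only [List.foldl]; rw [if_neg (fun h => hv h.2)]; exact ih

-- a fold that only fires while the state is still the sentinel computes the first match
theorem pv_fold_first (L : List Nat) (p : Nat → Bool) (s : Int)
    (hs : ∀ i ∈ L, (i : Int) ≠ s) :
    L.foldl (fun l i => if p i ∧ l = s then (i : Int) else l) s
      = (match L.find? p with | some i => (i : Int) | none => s) := by
  induction L with
  | nil => simp
  | cons x xs ih =>
    simp only [List.foldl, List.find?]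
    cases hx : p x with
    | true =>
      rw [if_pos (by simp)]
      exact pv_fold_stay xs p s (x : Int) (hs x (by simp))
    | false =>
      rw [if_neg (by simp)]
      exact ih (fun i hi => hs i (by simp [hi]))

-- a fold that always overwrites computes the last match
theorem pv_fold_last (L : List Nat) (q : Nat → Bool) (d : Int) :
    L.foldl (fun r i => if q i then (i : Int) else r) d
      = (match L.reverse.find? q with | some i => (i : Int) | none => d) := by
  induction L generalizing d with
  | nil => simp
  | cons x xs ih =>
    simp only [List.foldl, List.reverse_cons, List.find?_append]
    rw [ih]
    cases h : xs.reverse.find? q with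
    | some i => simp
    | none =>
      by_cases hx : q x <;> simp [hx, List.find?]

-- find? only depends on the predicate on members
theorem pv_find?_congr {α : Type} (L : List α) (p q : α → Bool)
    (h : ∀ i ∈ L, p i = q i) : L.find? p = L.find? q := by
  induction L with
  | nil => rfl
  | cons x xs ih =>
    simp only [List.find?]
    rw [h x (by simp)]
    cases q x
    · exact ih (fun i hi => h i (by simp [hi]))
    · rfl

-- independent pair fold splits into two folds
theorem pv_foldl_pair {α : Type} (L : List α) (f : Int → α → Int) (g : Int → α → Int)
    (b c : Int) :
    L.foldl (fun (s : Int × Int) i => (f s.1 i, g s.2 i)) (b, c)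
      = (L.foldl f b, L.foldl g c) := by
  induction L generalizing b c with
  | nil => rfl
  | cons x xs ih => simp [List.foldl, ih]

-- the fused right condition over range' 1 (cols-1) matches A's range' 1 (cols-2) scan
theorem pv_right_range (cols : Nat) (C : Nat → Bool) :
    (List.range' 1 (cols - 1)).reverse.find? (fun i => decide (i ≤ cols - 2) && C i)
      = (List.range' 1 (cols - 2)).reverse.find? C := by
  rcases Nat.lt_or_ge cols 2 with h | h
  · interval_cases cols <;> rfl
  · have h1 : cols - 1 = (cols - 2) + 1 := by omega
    rw [h1, List.range'_concat, List.reverse_append]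
    simp only [List.reverse_singleton, List.singleton_append, List.find?]
    have hfalse : ¬ (1 + 1 * (cols - 2) ≤ cols - 2) := by omega
    simp only [decide_eq_false hfalse, Bool.false_and]
    apply pv_find?_congr
    intro i hi
    simp only [List.mem_reverse, List.mem_range'] at hi
    have : decide (i ≤ cols - 2) = true := by simp; omega
    simp [this]

-- per-row equality of the two computations
theorem pv_row_eq (row : List (List Int)) (boundary : Int) (cols : Nat) :
    (let s := (List.range' 1 (cols - 1)).foldl
        (fun (s : Int × Int) i =>
          (if pvPix row (i - 1) ≥ boundary ∧ boundary > pvPix row i ∧ s.1 = (cols : Int)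
             then (i : Int) else s.1,
           if i ≤ cols - 2 ∧ pvPix row (i + 1) ≥ boundary ∧ boundary > pvPix row i
             then (i : Int) else s.2))
        ((cols : Int), 0);
      [s.1, s.2])
    = [(match (List.range' 1 (cols - 1)).find?
            (fun i => decide (pvPix row (i - 1) ≥ boundary ∧ boundary > pvPix row i)) with
        | some i => (i : Int)
        | none => (cols : Int)),
       (match ((List.range' 1 (cols - 2)).reverse).find?
            (fun i => decide (pvPix row (i + 1) ≥ boundary ∧ boundary > pvPix row i)) with
        | some i => (i : Int)
        | none => 0)] := by
  have hsplit := pv_foldl_pair (List.range' 1 (cols - 1))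
    (fun l i => if pvPix row (i - 1) ≥ boundary ∧ boundary > pvPix row i ∧ l = (cols : Int)
                  then (i : Int) else l)
    (fun r i => if i ≤ cols - 2 ∧ pvPix row (i + 1) ≥ boundary ∧ boundary > pvPix row i
                  then (i : Int) else r)
    (cols : Int) 0
  have hleft : (List.range' 1 (cols - 1)).foldl
      (fun l i => if pvPix row (i - 1) ≥ boundary ∧ boundary > pvPix row i ∧ l = (cols : Int)
                    then (i : Int) else l) (cols : Int)
      = (match (List.range' 1 (cols - 1)).find?
            (fun i => decide (pvPix row (i - 1) ≥ boundary ∧ boundary > pvPix row i)) with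
        | some i => (i : Int) | none => (cols : Int)) := by
    have := pv_fold_first (List.range' 1 (cols - 1))
      (fun i => decide (pvPix row (i - 1) ≥ boundary ∧ boundary > pvPix row i))
      (cols : Int)
      (by intro i hi
          simp only [List.mem_range'] at hi
          have : i < cols := by omega
          exact_mod_cast Nat.ne_of_lt this)
    rw [← this]
    apply PySem.List.foldl_congr_mem
    intro l i _hi
    by_cases hc : pvPix row (i - 1) ≥ boundary ∧ boundary > pvPix row i
    · by_cases hl : l = (cols : Int) <;> simp [hc, hl]
    · simp only [decide_eq_true_eq]
      rw [if_neg (show ¬(pvPix row (i - 1) ≥ boundary ∧ boundary > pvPix row i ∧ l = (cols : Int))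
            from fun h => hc ⟨h.1, h.2.1⟩),
          if_neg (show ¬((pvPix row (i - 1) ≥ boundary ∧ boundary > pvPix row i) ∧ l = (cols : Int))
            from fun h => hc h.1)]
  have hright : (List.range' 1 (cols - 1)).foldl
      (fun r i => if i ≤ cols - 2 ∧ pvPix row (i + 1) ≥ boundary ∧ boundary > pvPix row i
                    then (i : Int) else r) 0
      = (match ((List.range' 1 (cols - 2)).reverse).find?
            (fun i => decide (pvPix row (i + 1) ≥ boundary ∧ boundary > pvPix row i)) with
        | some i => (i : Int) | none => 0) := by
    have h1 := pv_fold_last (List.range' 1 (cols - 1))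
      (fun i => decide (i ≤ cols - 2) && decide (pvPix row (i + 1) ≥ boundary ∧ boundary > pvPix row i))
      0
    have h2 := pv_right_range cols
      (fun i => decide (pvPix row (i + 1) ≥ boundary ∧ boundary > pvPix row i))
    rw [h2] at h1
    rw [← h1]
    apply PySem.List.foldl_congr_mem
    intro r i _hi
    by_cases hc : i ≤ cols - 2 ∧ pvPix row (i + 1) ≥ boundary ∧ boundary > pvPix row i
    · simp [hc.1, hc.2.1, hc.2.2]
    · rw [if_neg hc, if_neg ?_]
      simp only [Bool.and_eq_true, decide_eq_true_eq]
      exact hc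
  rw [hsplit, hleft, hright]

-- ===== VERDICT (by name: the statement is the Claim_ definition above) =====
theorem findlr_spec : Claim_equal_findlr := by
  intro image boundary _hdom _hpre
  unfold Spec_findlr findlr findlr_alt
  rw [pv_foldl_append_map, List.nil_append]
  have hhead : image.getD 0 [] = image.headD [] := by cases image <;> rfl
  rw [← pv_map_range_getD image []
    (fun row =>
      let cols := (image.headD []).length
      let s := (List.range' 1 (cols - 1)).foldl
        (fun (s : Int × Int) i =>
          (if pvPix row (i - 1) ≥ boundary ∧ boundary > pvPix row i ∧ s.1 = (cols : Int)
             then (i : Int) else s.1,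
           if i ≤ cols - 2 ∧ pvPix row (i + 1) ≥ boundary ∧ boundary > pvPix row i
             then (i : Int) else s.2))
        ((cols : Int), 0)
      [s.1, s.2])]
  refine congrArg (fun f => List.map f (List.range image.length)) (funext fun j => ?_)
  simp only [hhead]
  exact (pv_row_eq (image.getD j []) boundary (image.headD []).length).symm
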